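-- pv_equiv track=rewrite | github.com/devonfw/IDEasy | documentation/generate_quality_status.py | _issue_cell
-- ===== SOURCE A (Python) =====
-- IssueRef = tuple[int, str, str, bool, bool, list[str]]
--
-- def _safe(text: str, max_len: int = 72) -> str:
--   """Sanitise text for use inside an AsciiDoc table cell.
--
--   Replaces pipe characters (which would break cell boundaries) and newlines,
--   then truncates to ``max_len`` characters, appending an ellipsis if needed.
--   """
--   s = text.replace("|", "-").replace("\n", " ")
--   return s[:max_len] + (" \u2026" if len(s) > max_len else "")
--
-- def _severity_icon(bug: bool, blocker: bool) -> str: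
--   """Return the status emoji for a given bug/blocker pair."""
--   if blocker: return "🚨"
--   if bug:     return "🔴"
--   return "🟡"
--
-- def _issue_cell(refs: list[IssueRef]) -> str:
--   """Format a list of issue refs as an AsciiDoc line-break-separated cell.
--
--   Entries are sorted by severity descending (blocker → bug → enhancement),
--   then by issue number ascending.  Each entry renders as:
--   ``<icon> link:<url>[#N] <title>``
--   """
--   if not refs:
--     return "—"
--
--   def _sort_key(r: IssueRef) -> tuple:
--     return (0 if r[4] else 1 if r[3] else 2, r[0])
--
--   parts = [
--     f"{_severity_icon(bug, blocker)} link:{url}[#{num}] {_safe(title)}"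
--     for num, title, url, bug, blocker, _ in sorted(refs, key=_sort_key)
--   ]
--   return " +\n".join(parts)
-- ===== SOURCE B (Python) =====
-- IssueRef = tuple[int, str, str, bool, bool, list[str]]
--
-- def _safe(text: str, max_len: int = 72) -> str:
--   s = text.replace("|", "-").replace("\n", " ")
--   return s[:max_len] + (" \u2026" if len(s) > max_len else "")
--
-- def _severity_icon(bug: bool, blocker: bool) -> str:
--   if blocker: return "🚨"
--   if bug:     return "🔴"
--   return "🟡"
--
-- def _issue_cell(refs: list[IssueRef]) -> str:
--   """Partition refs into severity buckets, sort each bucket by issue number."""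
--   if not refs:
--     return "—"
--   blockers, bugs, enhancements = [], [], []
--   for r in refs:
--     if r[4]:
--       blockers.append(r)
--     elif r[3]:
--       bugs.append(r)
--     else:
--       enhancements.append(r)
--   ordered = []
--   for bucket in (blockers, bugs, enhancements):
--     bucket.sort(key=lambda r: r[0])
--     ordered.extend(bucket)
--   return " +\n".join(
--     f"{_severity_icon(bug, blocker)} link:{url}[#{num}] {_safe(title)}"
--     for num, title, url, bug, blocker, _ in ordered)
-- ===== Notes on version B (the rewrite author's own statement) =====
-- stated objective: alternative
-- what changed: The single stable sort by the lexicographic key (severity, issue number) is replaced by a one-pass three-way partition into blocker/bug/enhancement buckets, a per-bucket stable sort by issue number, and concatenation in severity order.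
import Mathlib
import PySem

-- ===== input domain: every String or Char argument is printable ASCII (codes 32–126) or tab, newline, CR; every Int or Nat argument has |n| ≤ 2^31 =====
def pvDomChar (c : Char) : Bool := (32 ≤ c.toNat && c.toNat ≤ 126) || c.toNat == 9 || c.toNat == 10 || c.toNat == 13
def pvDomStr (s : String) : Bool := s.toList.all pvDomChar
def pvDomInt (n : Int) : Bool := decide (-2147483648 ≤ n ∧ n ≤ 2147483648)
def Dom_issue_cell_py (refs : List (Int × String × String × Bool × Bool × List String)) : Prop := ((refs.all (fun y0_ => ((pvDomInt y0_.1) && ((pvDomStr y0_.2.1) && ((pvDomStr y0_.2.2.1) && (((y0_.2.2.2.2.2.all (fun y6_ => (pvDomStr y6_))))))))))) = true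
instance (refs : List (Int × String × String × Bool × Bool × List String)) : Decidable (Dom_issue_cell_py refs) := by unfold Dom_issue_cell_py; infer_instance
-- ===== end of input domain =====

-- Header: B partitions refs once into blocker/bug/enhancement buckets, stably sorts each bucket
-- by issue number and concatenates them, instead of A's single stable sort by the lexicographic
-- key (severity, number); same output, alternative decomposition (no speed claim).

abbrev IssueRefL : Type := Int × String × String × Bool × Bool × List String

-- ===== PORT A =====
-- _safe: replace '|' and '\n', truncate to max_len, append " …" if truncated
def safe_py (text : String) (max_len : Int) : String :=
  let s := PySem.Str.replace (PySem.Str.replace text "|" "-") "\n" " "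
  PySem.Str.slice s none (some max_len) ++ (if max_len < (PySem.Str.len s : Int) then " …" else "")

def severity_icon_py (bug : Bool) (blocker : Bool) : String :=
  if blocker then "🚨" else if bug then "🔴" else "🟡"

-- the f-string body, shared verbatim by A and B (B's Python reuses _safe/_severity_icon unchanged)
def fmt_ref_py (r : IssueRefL) : String :=
  severity_icon_py r.2.2.2.1 r.2.2.2.2.1 ++ " link:" ++ r.2.2.1 ++ "[#" ++ PySem.Int.toStr r.1 ++ "] " ++ safe_py r.2.1 72

-- _sort_key's first component: 0 if r[4] else 1 if r[3] else 2
def sortKey1_py (r : IssueRefL) : Int :=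
  if r.2.2.2.2.1 then 0 else if r.2.2.2.1 then 1 else 2

def issue_cell_py (refs : List IssueRefL) : String :=
  if refs = [] then "—"
  else PySem.Str.join " +\n"
    ((PySem.List.sorted2 refs sortKey1_py (fun r => r.1) false).map fmt_ref_py)

-- ===== PORT B =====
-- the one-pass partition loop: append each ref to its severity bucket
def bucket3_py (refs : List IssueRefL) : List IssueRefL × List IssueRefL × List IssueRefL :=
  refs.foldl (fun acc r =>
    if r.2.2.2.2.1 then (acc.1 ++ [r], acc.2.1, acc.2.2)
    else if r.2.2.2.1 then (acc.1, acc.2.1 ++ [r], acc.2.2)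
    else (acc.1, acc.2.1, acc.2.2 ++ [r])) ([], [], [])

def issue_cell_py_alt (refs : List IssueRefL) : String :=
  if refs = [] then "—"
  else
    let b := bucket3_py refs
    -- the 'for bucket in (blockers, bugs, enhancements): bucket.sort(key=…); ordered.extend(bucket)' loop, written out
    let ordered := PySem.List.sorted b.1 (fun r => r.1) false
               ++ PySem.List.sorted b.2.1 (fun r => r.1) false
               ++ PySem.List.sorted b.2.2 (fun r => r.1) false
    PySem.Str.join " +\n" (ordered.map fmt_ref_py)

-- ===== PRECONDITION & SPEC =====
def Spec_issue_cell_py (refs : List (Int × String × String × Bool × Bool × List String)) (out : String) : Prop := out = issue_cell_py_alt refs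
instance (refs : List (Int × String × String × Bool × Bool × List String)) (out : String) : Decidable (Spec_issue_cell_py refs out) := by unfold Spec_issue_cell_py; infer_instance

-- ===== CLAIM (what is proved, stated in full; the proofs are below) =====
def Claim_equal_issue_cell_py : Prop := ∀ (refs : List (Int × String × String × Bool × Bool × List String)), Dom_issue_cell_py refs → Spec_issue_cell_py refs (issue_cell_py refs)

-- ===== LEMMAS AND PROOFS =====

theorem insertBy_nil {α : Type} (f : α → α → Bool) (x : α) :
    PySem.List.insertBy f x [] = [x] := rfl

theorem insertBy_cons {α : Type} (f : α → α → Bool) (x y : α) (ys : List α) :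
    PySem.List.insertBy f x (y :: ys) =
      if f x y then x :: y :: ys else y :: PySem.List.insertBy f x ys := rfl

theorem insertBy_congr {α : Type} (f g : α → α → Bool) (x : α) (l : List α)
    (h : ∀ y ∈ l, f x y = g x y) :
    PySem.List.insertBy f x l = PySem.List.insertBy g x l := by
  induction l with
  | nil => rfl
  | cons y ys ih =>
    rw [insertBy_cons, insertBy_cons, h y (List.mem_cons_self ..),
        ih (fun z hz => h z (List.mem_cons_of_mem _ hz))]

theorem insertBy_append_left {α : Type} (f : α → α → Bool) (x : α) (l1 l2 : List α)
    (h : ∀ y ∈ l1, f x y = false) :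
    PySem.List.insertBy f x (l1 ++ l2) = l1 ++ PySem.List.insertBy f x l2 := by
  induction l1 with
  | nil => rfl
  | cons y ys ih =>
    rw [List.cons_append, insertBy_cons, h y (List.mem_cons_self ..)]
    simp [ih (fun z hz => h z (List.mem_cons_of_mem _ hz))]

theorem insertBy_append_right {α : Type} (f : α → α → Bool) (x : α) (l1 l2 : List α)
    (h : ∀ y ∈ l2, f x y = true) :
    PySem.List.insertBy f x (l1 ++ l2) = PySem.List.insertBy f x l1 ++ l2 := by
  induction l1 with
  | nil =>
    cases l2 with
    | nil => rfl
    | cons z zs => simp [insertBy_cons, insertBy_nil, h z (List.mem_cons_self ..)]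
  | cons y ys ih =>
    rw [List.cons_append, insertBy_cons, insertBy_cons]
    by_cases hf : f x y = true
    · simp [hf]
    · simp only [Bool.not_eq_true] at hf
      simp [hf, ih]

-- the generic bucket decomposition of a stable lexicographic-key insertion sort
theorem sorted2_bucket {α : Type} (k1 k2 : α → Int) (xs : List α)
    (h : ∀ x ∈ xs, k1 x = 0 ∨ k1 x = 1 ∨ k1 x = 2) :
    PySem.List.sorted2 xs k1 k2 false =
      PySem.List.sorted (xs.filter fun x => k1 x == 0) k2 false
      ++ PySem.List.sorted (xs.filter fun x => k1 x == 1) k2 false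
      ++ PySem.List.sorted (xs.filter fun x => k1 x == 2) k2 false := by
  induction xs using List.reverseRecOn with
  | nil => rfl
  | append_singleton ys x ih =>
    have hx := h x (by simp)
    have hys : ∀ y ∈ ys, k1 y = 0 ∨ k1 y = 1 ∨ k1 y = 2 :=
      fun y hy => h y (by simp [hy])
    have hmem : ∀ (i : Int) (y : α),
        y ∈ PySem.List.sorted (ys.filter fun z => k1 z == i) k2 false → k1 y = i := by
      intro i y hy
      rw [PySem.List.mem_sorted] at hy
      have := List.of_mem_filter hy
      simpa using this
    -- unfold sorted2 / sorted to their foldl-insertBy forms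
    have e2 : ∀ (zs : List α), PySem.List.sorted2 zs k1 k2 false =
        zs.foldl (fun acc z => PySem.List.insertBy
          (fun a b => decide (k1 a < k1 b) || (!decide (k1 b < k1 a) && decide (k2 a < k2 b))) z acc) [] :=
      fun zs => rfl
    have e1 : ∀ (zs : List α), PySem.List.sorted zs k2 false =
        zs.foldl (fun acc z => PySem.List.insertBy
          (fun a b => decide (k2 a < k2 b)) z acc) [] :=
      fun zs => rfl
    set llt : α → α → Bool :=
      fun a b => decide (k1 a < k1 b) || (!decide (k1 b < k1 a) && decide (k2 a < k2 b)) with hllt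
    set nlt : α → α → Bool := fun a b => decide (k2 a < k2 b) with hnlt
    set S : Int → List α := fun i => PySem.List.sorted (ys.filter fun z => k1 z == i) k2 false with hS
    have hstep : ∀ (i : Int), PySem.List.sorted ((ys ++ [x]).filter fun z => k1 z == i) k2 false =
        if k1 x == i then PySem.List.insertBy nlt x (S i) else S i := by
      intro i
      rw [e1, List.filter_append]
      by_cases hi : k1 x == i
      · simp only [List.filter_cons, List.filter_nil, hi, List.foldl_append, hS, e1]
        simp
      · simp only [List.filter_cons, List.filter_nil, hi]
        simp [hS, e1]
    have hL : PySem.List.sorted2 (ys ++ [x]) k1 k2 false =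
        PySem.List.insertBy llt x (S 0 ++ S 1 ++ S 2) := by
      rw [e2, List.foldl_append, ← e2, ih hys]
      simp [hS]
    -- pointwise facts about llt against bucket members
    have hvs : ∀ (i : Int) (y : α), k1 y = i → k1 x < i → llt x y = true := by
      intro i y hyi hlt
      simp [hllt, hyi.symm ▸ hlt]
    have hvf : ∀ (i : Int) (y : α), k1 y = i → i < k1 x → llt x y = false := by
      intro i y hyi hlt
      have h1 : ¬ (k1 x < k1 y) := by omega
      have h2 : k1 y < k1 x := by omega
      simp [hllt, h1, h2]
    have hveq : ∀ (y : α), k1 y = k1 x → llt x y = nlt x y := by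
      intro y hyx
      have h1 : ¬ (k1 x < k1 y) := by omega
      have h2 : ¬ (k1 y < k1 x) := by omega
      simp [hllt, hnlt, h1, h2]
    rw [hL]
    rcases hx with hx0 | hx1 | hx2
    · -- blocker bucket: insert within S 0, everything after it compares greater
      have hr : ∀ y ∈ S 1 ++ S 2, llt x y = true := by
        intro y hy
        rcases List.mem_append.1 hy with hy | hy
        · exact hvs 1 y (hmem 1 y hy) (by omega)
        · exact hvs 2 y (hmem 2 y hy) (by omega)
      rw [List.append_assoc, insertBy_append_right llt x (S 0) (S 1 ++ S 2) hr,
          insertBy_congr llt nlt x (S 0) (fun y hy => hveq y (by rw [hmem 0 y hy, hx0])),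
          hstep 0, hstep 1, hstep 2]
      simp [hx0, List.append_assoc]
    · -- bug bucket
      have hl : ∀ y ∈ S 0, llt x y = false := fun y hy => hvf 0 y (hmem 0 y hy) (by omega)
      have hr : ∀ y ∈ S 2, llt x y = true := fun y hy => hvs 2 y (hmem 2 y hy) (by omega)
      rw [List.append_assoc, insertBy_append_left llt x (S 0) (S 1 ++ S 2) hl,
          insertBy_append_right llt x (S 1) (S 2) hr,
          insertBy_congr llt nlt x (S 1) (fun y hy => hveq y (by rw [hmem 1 y hy, hx1])),
          hstep 0, hstep 1, hstep 2]
      simp [hx1, List.append_assoc]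
    · -- enhancement bucket
      have hl : ∀ y ∈ S 0 ++ S 1, llt x y = false := by
        intro y hy
        rcases List.mem_append.1 hy with hy | hy
        · exact hvf 0 y (hmem 0 y hy) (by omega)
        · exact hvf 1 y (hmem 1 y hy) (by omega)
      rw [insertBy_append_left llt x (S 0 ++ S 1) (S 2) hl,
          insertBy_congr llt nlt x (S 2) (fun y hy => hveq y (by rw [hmem 2 y hy, hx2])),
          hstep 0, hstep 1, hstep 2]
      simp [hx2, List.append_assoc]

-- B's partition loop computes the three severity filters
theorem bucket3_eq (refs : List IssueRefL) :
    bucket3_py refs =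
      (refs.filter (fun r => r.2.2.2.2.1),
       refs.filter (fun r => !r.2.2.2.2.1 && r.2.2.2.1),
       refs.filter (fun r => !r.2.2.2.2.1 && !r.2.2.2.1)) := by
  suffices h : ∀ (a b c : List IssueRefL),
      refs.foldl (fun acc r =>
        if r.2.2.2.2.1 then (acc.1 ++ [r], acc.2.1, acc.2.2)
        else if r.2.2.2.1 then (acc.1, acc.2.1 ++ [r], acc.2.2)
        else (acc.1, acc.2.1, acc.2.2 ++ [r])) (a, b, c) =
      (a ++ refs.filter (fun r => r.2.2.2.2.1),
       b ++ refs.filter (fun r => !r.2.2.2.2.1 && r.2.2.2.1),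
       c ++ refs.filter (fun r => !r.2.2.2.2.1 && !r.2.2.2.1)) by
    simpa [bucket3_py] using h [] [] []
  induction refs with
  | nil => simp
  | cons r rs ih =>
    intro a b c
    by_cases h4 : r.2.2.2.2.1
    · simp [h4, List.foldl_cons, ih]
    · by_cases h3 : r.2.2.2.1
      · simp [h4, h3, List.foldl_cons, ih]
      · simp [h4, h3, List.foldl_cons, ih]

theorem filter_key0 (refs : List IssueRefL) :
    (refs.filter fun r => sortKey1_py r == 0) = refs.filter (fun r => r.2.2.2.2.1) := by
  apply List.filter_congr
  intro r _
  rcases r with ⟨n, t, u, bug, blocker, ls⟩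
  cases bug <;> cases blocker <;> simp [sortKey1_py]

theorem filter_key1 (refs : List IssueRefL) :
    (refs.filter fun r => sortKey1_py r == 1) = refs.filter (fun r => !r.2.2.2.2.1 && r.2.2.2.1) := by
  apply List.filter_congr
  intro r _
  rcases r with ⟨n, t, u, bug, blocker, ls⟩
  cases bug <;> cases blocker <;> simp [sortKey1_py]

theorem filter_key2 (refs : List IssueRefL) :
    (refs.filter fun r => sortKey1_py r == 2) = refs.filter (fun r => !r.2.2.2.2.1 && !r.2.2.2.1) := by
  apply List.filter_congr
  intro r _
  rcases r with ⟨n, t, u, bug, blocker, ls⟩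
  cases bug <;> cases blocker <;> simp [sortKey1_py]

-- ===== VERDICT (by name: the statement is the Claim_ definition above) =====
theorem issue_cell_py_spec : Claim_equal_issue_cell_py := by
  intro refs _
  unfold Spec_issue_cell_py issue_cell_py issue_cell_py_alt
  by_cases hempty : refs = []
  · simp [hempty]
  · rw [if_neg hempty, if_neg hempty]
    rw [sorted2_bucket sortKey1_py (fun r => r.1) refs (by
      intro x _
      rcases x with ⟨n, t, u, bug, blocker, ls⟩
      cases bug <;> cases blocker <;> simp [sortKey1_py])]
    rw [bucket3_eq, filter_key0, filter_key1, filter_key2]
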